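-- pv_equiv track=rewrite | github.com/pypi-data/pypi-mirror-293 | packages/feagi-connector/feagi_connector-0.0.18-py3-none-any.whl/feagi_connector/actuators.py | get_motor_data
-- ===== SOURCE A (Python) =====
-- def feagi_id_converter(id):
--     """
--     This function converts motor IDs from 1,3,5,7 to 0,1,2,3.
--     so, if you select 0 and 1, it will end up 0. if you select 2 and 3, it will end up 1.
--     """
--     if id % 2 == 0:
--         return id // 2
--     else:
--         return (id - 1) // 2
--
-- def power_convert(motor_id, power):
--     if motor_id % 2 == 0:
--         return abs(power)
--     else:
--         return -1 * power
--
-- def get_motor_data(obtained_data, moving_average):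
--     motor_data = dict()
--     processed_obtained_data = dict()
--     if 'motor' in obtained_data:
--         if obtained_data['motor'] is not {}:
--             sorted_keys = sorted(obtained_data['motor'].keys(), key=int)
--             for data_point in sorted_keys:
--                 device_power = power_convert(data_point, obtained_data['motor'][data_point])
--                 device_id = feagi_id_converter(data_point)
--                 if device_id in motor_data:
--                     motor_data[device_id] = motor_data[device_id] - obtained_data['motor'][data_point]
--                 else:
--                     motor_data[device_id] = device_power
--     return motor_data
-- ===== SOURCE B (Python) =====
-- def feagi_id_converter(id):
--     if id % 2 == 0:
--         return id // 2
--     else: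
--         return (id - 1) // 2
--
-- def power_convert(motor_id, power):
--     if motor_id % 2 == 0:
--         return abs(power)
--     else:
--         return -1 * power
--
-- def get_motor_data(obtained_data, moving_average):
--     motor_data = dict()
--     if 'motor' in obtained_data:
--         motor = obtained_data['motor']
--         groups = dict()
--         for k in sorted(motor.keys(), key=int):
--             groups.setdefault(feagi_id_converter(k), []).append(k)
--         for device_id, ks in groups.items():
--             total = power_convert(ks[0], motor[ks[0]])
--             for k in ks[1:]:
--                 total -= motor[k]
--             motor_data[device_id] = total
--     return motor_data
-- ===== Notes on version B (the rewrite author's own statement) =====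
-- stated objective: alternative
-- what changed: A's single loop that inserts-or-updates a result dict per sorted key is replaced by a group-then-reduce decomposition: first group the sorted motor keys by converted device id, then compute each group's total in one inner fold and emit the result dict from the groups.
import Mathlib
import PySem

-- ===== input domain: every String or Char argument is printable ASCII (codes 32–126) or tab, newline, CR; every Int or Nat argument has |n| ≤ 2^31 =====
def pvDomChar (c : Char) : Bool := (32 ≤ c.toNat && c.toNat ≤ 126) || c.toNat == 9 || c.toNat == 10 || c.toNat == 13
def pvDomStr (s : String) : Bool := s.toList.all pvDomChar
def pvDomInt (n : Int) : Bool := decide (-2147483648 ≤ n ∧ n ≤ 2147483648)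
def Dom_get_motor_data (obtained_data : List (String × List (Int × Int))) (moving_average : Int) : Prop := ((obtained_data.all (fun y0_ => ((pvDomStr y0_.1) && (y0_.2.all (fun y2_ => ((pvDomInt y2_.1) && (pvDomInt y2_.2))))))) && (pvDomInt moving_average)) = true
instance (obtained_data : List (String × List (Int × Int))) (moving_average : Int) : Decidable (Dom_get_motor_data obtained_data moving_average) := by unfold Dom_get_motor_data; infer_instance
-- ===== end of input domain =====

-- B replaces A's single loop with mixed insert-or-update dict logic by a group-then-reduce
-- decomposition (group sorted keys by device id, then fold each group); same cost, different structure.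

-- ===== PORT A =====
-- module helper (shared by both Pythons)
def feagi_id_converter (id : Int) : Int :=
  if PySem.Int.mod id 2 = 0 then PySem.Int.floordiv id 2
  else PySem.Int.floordiv (id - 1) 2

-- module helper (shared by both Pythons)
def power_convert (motor_id : Int) (power : Int) : Int :=
  if PySem.Int.mod motor_id 2 = 0 then |power| else -1 * power

def get_motor_data (obtained_data : List (String × List (Int × Int))) (moving_average : Int) : List (Int × Int) :=
  let motor_data : PySem.Dict Int Int := PySem.Dict.empty
  match (PySem.Dict.mk obtained_data).get? "motor" with
  | some motorItems =>
      let motor : PySem.Dict Int Int := PySem.Dict.mk motorItems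
      -- Python's `if obtained_data['motor'] is not {}:` is always True (identity test); no branch needed
      let sorted_keys := PySem.List.sorted motor.keys (fun k => k)   -- key=int is the identity on int keys
      (sorted_keys.foldl (fun md data_point =>
        let device_power := power_convert data_point (motor.getD data_point 0)
        let device_id := feagi_id_converter data_point
        if md.contains device_id then
          md.insert device_id (md.getD device_id 0 - motor.getD data_point 0)
        else
          md.insert device_id device_power) motor_data).items
  | none => motor_data.items

-- ===== PORT B =====
-- total = power_convert(ks[0], motor[ks[0]]); for k in ks[1:]: total -= motor[k]
def group_total (motor : PySem.Dict Int Int) : List Int → Int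
  | [] => 0   -- unreachable: every group is created non-empty
  | k0 :: rest => rest.foldl (fun t k => t - motor.getD k 0) (power_convert k0 (motor.getD k0 0))

def get_motor_data_alt (obtained_data : List (String × List (Int × Int))) (moving_average : Int) : List (Int × Int) :=
  match (PySem.Dict.mk obtained_data).get? "motor" with
  | some motorItems =>
      let motor : PySem.Dict Int Int := PySem.Dict.mk motorItems
      let groups : PySem.Dict Int (List Int) :=
        (PySem.List.sorted motor.keys (fun k => k)).foldl
          (fun g k => g.modify (feagi_id_converter k) [] (fun ks => ks ++ [k]))
          PySem.Dict.empty
      (groups.items.foldl (fun md p => md.insert p.1 (group_total motor p.2))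
        (PySem.Dict.empty : PySem.Dict Int Int)).items
  | none => []

-- ===== PRECONDITION & SPEC =====
def Spec_get_motor_data (obtained_data : List (String × List (Int × Int))) (moving_average : Int) (out : List (Int × Int)) : Prop := out = get_motor_data_alt obtained_data moving_average
instance (obtained_data : List (String × List (Int × Int))) (moving_average : Int) (out : List (Int × Int)) : Decidable (Spec_get_motor_data obtained_data moving_average out) := by unfold Spec_get_motor_data; infer_instance

-- ===== CLAIM (what is proved, stated in full; the proofs are below) =====
def Claim_equal_get_motor_data : Prop := ∀ (obtained_data : List (String × List (Int × Int))) (moving_average : Int), Dom_get_motor_data obtained_data moving_average → Spec_get_motor_data obtained_data moving_average (get_motor_data obtained_data moving_average)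

-- ===== LEMMAS AND PROOFS =====

-- B's per-group totals applied entrywise to a grouping dict
def mapTotals (motor : PySem.Dict Int Int) (g : PySem.Dict Int (List Int)) : PySem.Dict Int Int :=
  PySem.Dict.mk (g.items.map (fun p => (p.1, group_total motor p.2)))

theorem group_total_append (motor : PySem.Dict Int Int) (k0 : Int) (rest : List Int) (k : Int) :
    group_total motor (k0 :: rest ++ [k]) = group_total motor (k0 :: rest) - motor.getD k 0 := by
  simp [group_total, List.foldl_append]

theorem keys_mapTotals (motor : PySem.Dict Int Int) (g : PySem.Dict Int (List Int)) :
    (mapTotals motor g).keys = g.keys := by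
  simp [mapTotals, PySem.Dict.keys]

theorem contains_mapTotals (motor : PySem.Dict Int Int) (g : PySem.Dict Int (List Int)) (x : Int) :
    (mapTotals motor g).contains x = g.contains x := by
  rw [PySem.Dict.contains_eq_decide_mem_keys, PySem.Dict.contains_eq_decide_mem_keys, keys_mapTotals]

-- the heart of the equivalence: A's insert-or-update loop, run on the entrywise totals of a
-- grouping dict, is the entrywise totals of B's grouping loop
theorem foldl_step_eq (motor : PySem.Dict Int Int) (ks : List Int) :
    ∀ (g : PySem.Dict Int (List Int)), g.keys.Nodup → (∀ pr ∈ g.items, pr.2 ≠ []) →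
    ks.foldl (fun md data_point =>
        if md.contains (feagi_id_converter data_point) = true then
          md.insert (feagi_id_converter data_point)
            (md.getD (feagi_id_converter data_point) 0 - motor.getD data_point 0)
        else
          md.insert (feagi_id_converter data_point)
            (power_convert data_point (motor.getD data_point 0))) (mapTotals motor g)
      = mapTotals motor
          (ks.foldl (fun g k => g.modify (feagi_id_converter k) [] (fun l => l ++ [k])) g) := by
  induction ks with
  | nil => intro g _ _; rfl
  | cons k ks ih =>
    intro g hnd hne
    simp only [List.foldl_cons]
    have hstep :
        (if (mapTotals motor g).contains (feagi_id_converter k) = true then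
          (mapTotals motor g).insert (feagi_id_converter k)
            ((mapTotals motor g).getD (feagi_id_converter k) 0 - motor.getD k 0)
        else
          (mapTotals motor g).insert (feagi_id_converter k)
            (power_convert k (motor.getD k 0)))
        = mapTotals motor (g.modify (feagi_id_converter k) [] (fun l => l ++ [k])) := by
      rw [contains_mapTotals]
      show _ = mapTotals motor (g.insert (feagi_id_converter k) ((g.getD (feagi_id_converter k) []) ++ [k]))
      by_cases hc : g.contains (feagi_id_converter k) = true
      · -- the device id already has a group: both sides update the existing entry in place
        rw [if_pos hc]
        have hk : feagi_id_converter k ∈ g.keys := (PySem.Dict.contains_iff_mem_keys g _).1 hc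
        simp only [PySem.Dict.keys, List.mem_map] at hk
        obtain ⟨pr, hpr, hpr1⟩ := hk
        have hprm : (feagi_id_converter k, pr.2) ∈ g.items := by rw [← hpr1]; simpa using hpr
        have hl : g.getD (feagi_id_converter k) [] = pr.2 :=
          PySem.Dict.getD_of_mem_items g hprm hnd []
        obtain ⟨k0, rest, hk0⟩ : ∃ k0 rest, pr.2 = k0 :: rest := by
          cases h2 : pr.2 with
          | nil => exact absurd h2 (hne pr hpr)
          | cons a b => exact ⟨a, b, rfl⟩
        have hval : (mapTotals motor g).getD (feagi_id_converter k) 0 = group_total motor pr.2 := by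
          apply PySem.Dict.getD_of_mem_items (d := mapTotals motor g)
          · simp only [mapTotals, List.mem_map]
            exact ⟨(feagi_id_converter k, pr.2), hprm, rfl⟩
          · rw [keys_mapTotals]; exact hnd
        rw [hval, hl]
        have hcm : (mapTotals motor g).contains (feagi_id_converter k) = true := by
          rw [contains_mapTotals]; exact hc
        apply PySem.Dict.ext
        rw [PySem.Dict.items_insert_of_contains _ _ hcm]
        simp only [mapTotals, PySem.Dict.items_insert_of_contains _ _ hc, List.map_map]
        apply List.map_congr_left
        intro q _
        by_cases hq1 : (q.1 == feagi_id_converter k) = true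
        · simp only [Function.comp, hq1, hk0, if_pos]
          simp only [Prod.mk.injEq, true_and]
          exact (group_total_append motor k0 rest k).symm
        · simp [Function.comp, hq1]
      · -- a fresh device id: both sides append a new entry
        have hc' : g.contains (feagi_id_converter k) = false := by simpa using hc
        rw [if_neg hc, PySem.Dict.getD_of_not_contains g _ hc']
        have hcm : (mapTotals motor g).contains (feagi_id_converter k) = false := by
          rw [contains_mapTotals]; exact hc'
        apply PySem.Dict.ext
        rw [PySem.Dict.items_insert_of_not_contains _ _ hcm]
        simp [mapTotals, PySem.Dict.items_insert_of_not_contains _ _ hc', group_total]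
    rw [hstep]
    apply ih
    · exact PySem.Dict.nodup_keys_insert _ _ _ hnd
    · intro pr hpr
      rcases (PySem.Dict.mem_items_insert _ _ _ _).1 hpr with h | ⟨h, _⟩
      · subst h; simp
      · exact hne pr h

theorem get_motor_data_spec : Claim_equal_get_motor_data := by
  unfold Claim_equal_get_motor_data Spec_get_motor_data
  intro obtained_data moving_average _
  cases h : (PySem.Dict.mk obtained_data).get? "motor" with
  | none =>
    simp only [get_motor_data, get_motor_data_alt, h]
    rfl
  | some motorItems =>
    simp only [get_motor_data, get_motor_data_alt, h]
    have hempty : mapTotals (PySem.Dict.mk motorItems) PySem.Dict.empty = PySem.Dict.empty := rfl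
    conv_lhs => rw [← hempty]
    rw [foldl_step_eq (PySem.Dict.mk motorItems) _ PySem.Dict.empty PySem.Dict.nodup_keys_empty
      (by intro pr hpr; simp [PySem.Dict.empty] at hpr)]
    rw [PySem.Dict.items_foldl_insert_fresh _ Prod.fst (fun p => group_total (PySem.Dict.mk motorItems) p.2)
      PySem.Dict.empty (fun a _ => PySem.Dict.contains_empty _)
      (PySem.Dict.nodup_keys_foldl_modify_key _ feagi_id_converter [] (fun _ k l => l ++ [k])
        PySem.Dict.empty PySem.Dict.nodup_keys_empty)]
    rfl
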